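-- pv_equiv track=rewrite | github.com/mfascia/Kryptos | kk.py | raised_letters_expand
-- ===== SOURCE A (Python) =====
-- def raised_letters_expand(text):
-- 	# 0123456
-- 	# endYAhR
-- 	expanded = ""
-- 	k = 0
-- 	i = 0
-- 	while i < len(text):
-- 		if k % 7 in [3, 4, 6]:
-- 		# if k % 7 in [0, 1, 2, 5]:
-- 			expanded += "?"
-- 		else:
-- 			expanded += text[i]
-- 			i += 1
-- 		k += 1
-- 	return expanded
-- ===== SOURCE B (Python) =====
-- def raised_letters_expand(text):
--     # Chunk-based rewrite: emit a fixed 7-slot template per 4 input chars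
--     # instead of stepping a k-counter over output slots.
--     out = []
--     for j in range(0, len(text), 4):
--         blk = text[j:j+4]
--         if len(blk) < 4:
--             out.append(blk)
--         elif j + 4 == len(text):
--             out.append(blk[:3] + "??" + blk[3])
--         else:
--             out.append(blk[:3] + "??" + blk[3] + "?")
--     return "".join(out)
-- ===== Notes on version B (the rewrite author's own statement) =====
-- stated objective: faster
-- what changed: Replaced the stateful while-loop that steps an output-slot counter k, tests k%7 per slot and grows the result by repeated string concatenation, with a single pass cutting the text into blocks of 4 chars, emitting a fixed 7-slot template per block (no trailing placeholder on the final full block, short tail passed through) and joining the parts once.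
import Mathlib
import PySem

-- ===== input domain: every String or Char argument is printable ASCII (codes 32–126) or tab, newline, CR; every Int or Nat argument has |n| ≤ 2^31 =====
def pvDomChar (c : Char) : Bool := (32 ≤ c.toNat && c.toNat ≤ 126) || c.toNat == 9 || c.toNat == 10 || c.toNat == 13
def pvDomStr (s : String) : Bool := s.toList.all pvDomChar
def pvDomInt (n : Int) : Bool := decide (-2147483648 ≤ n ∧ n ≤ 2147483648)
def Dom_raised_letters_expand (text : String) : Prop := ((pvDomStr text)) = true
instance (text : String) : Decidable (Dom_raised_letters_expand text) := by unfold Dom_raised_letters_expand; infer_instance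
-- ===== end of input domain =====

-- B replaces A's per-output-slot k%7 counter loop (quadratic string concatenation) with a per-4-char-block template emission joined once; objective: faster.

-- ===== PORT A =====
-- steps-to-next-consuming-slot, used only for termination of the loop below
def pvPad (r : Nat) : Nat := if r = 3 then 2 else if r = 4 then 1 else if r = 6 then 1 else 0

-- A's while loop: remaining input chars stand for i < len(text); k is the output-slot counter.
def pvALoop (cs : List Char) (k : Nat) : List Char :=
  match cs with
  | [] => []
  | c :: rest =>
    if h : k % 7 = 3 ∨ k % 7 = 4 ∨ k % 7 = 6 then
      '?' :: pvALoop (c :: rest) (k + 1)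
    else
      c :: pvALoop rest (k + 1)
termination_by cs.length * 3 + pvPad (k % 7)
decreasing_by
  · simp only [pvPad, List.length_cons]; split_ifs <;> omega
  · simp only [pvPad, List.length_cons]; split_ifs <;> omega

def raised_letters_expand (text : String) : String := String.mk (pvALoop text.toList 0)

-- ===== PORT B =====
-- Source B's for-loop over 4-char blocks: a short block passes through, the last
-- full block emits "abc??d", every other block emits "abc??d?".
def pvBLoop (cs : List Char) : List Char :=
  match cs with
  | a :: b :: c :: d :: rest =>
    if rest = [] then [a, b, c, '?', '?', d]
    else [a, b, c, '?', '?', d, '?'] ++ pvBLoop rest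
  | [] => []
  | [a] => [a]
  | [a, b] => [a, b]
  | [a, b, c] => [a, b, c]

def raised_letters_expand_alt (text : String) : String := String.mk (pvBLoop text.toList)

-- ===== PRECONDITION & SPEC =====
def Spec_raised_letters_expand (text : String) (out : String) : Prop := out = raised_letters_expand_alt text
instance (text : String) (out : String) : Decidable (Spec_raised_letters_expand text out) := by unfold Spec_raised_letters_expand; infer_instance

-- ===== CLAIM (what is proved, stated in full; the proofs are below) =====
def Claim_equal_raised_letters_expand : Prop := ∀ (text : String), Dom_raised_letters_expand text → Spec_raised_letters_expand text (raised_letters_expand text)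

-- ===== LEMMAS AND PROOFS =====

-- Unfolding A's loop through one 7-slot block (k a multiple of 7).
lemma pvALoop_block (a b c d : Char) (rest : List Char) (m : Nat) :
    pvALoop (a :: b :: c :: d :: rest) (7 * m) =
      [a, b, c, '?', '?', d] ++ (if rest = [] then [] else '?' :: pvALoop rest (7 * m + 7)) := by
  rw [pvALoop, dif_neg (by omega)]
  rw [pvALoop, dif_neg (by omega)]
  rw [pvALoop, dif_neg (by omega)]
  rw [pvALoop, dif_pos (by omega)]
  rw [pvALoop, dif_pos (by omega)]
  rw [pvALoop, dif_neg (by omega)]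
  cases rest with
  | nil => rw [pvALoop]; simp
  | cons x xs =>
      rw [pvALoop, dif_pos (by omega)]
      simp [show 7 * m + 1 + 1 + 1 + 1 + 1 + 1 + 1 = 7 * m + 7 from by ring]

lemma pvALoop_eq_pvBLoop (cs : List Char) (m : Nat) :
    pvALoop cs (7 * m) = pvBLoop cs := by
  induction hn : cs.length using Nat.strong_induction_on generalizing cs m with
  | _ n ih =>
    match cs with
    | [] => rw [pvALoop, pvBLoop]
    | [a] =>
        rw [pvALoop, dif_neg (by omega), pvALoop, pvBLoop]
    | [a, b] =>
        rw [pvALoop, dif_neg (by omega), pvALoop, dif_neg (by omega), pvALoop, pvBLoop]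
    | [a, b, c] =>
        rw [pvALoop, dif_neg (by omega), pvALoop, dif_neg (by omega),
            pvALoop, dif_neg (by omega), pvALoop, pvBLoop]
    | a :: b :: c :: d :: rest =>
        rw [pvALoop_block a b c d rest m, pvBLoop]
        cases rest with
        | nil => simp
        | cons x xs =>
            rw [if_neg (by simp), if_neg (by simp)]
            have hrec : pvALoop (x :: xs) (7 * (m + 1)) = pvBLoop (x :: xs) :=
              ih (x :: xs).length (by simp at hn ⊢; omega) (x :: xs) (m + 1) rfl
            rw [show 7 * m + 7 = 7 * (m + 1) from by ring, hrec]
            simp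

-- ===== VERDICT (by name: the statement is the Claim_ definition above) =====
theorem raised_letters_expand_spec : Claim_equal_raised_letters_expand := by
  intro text _
  unfold Spec_raised_letters_expand raised_letters_expand raised_letters_expand_alt
  rw [show (0 : Nat) = 7 * 0 from rfl, pvALoop_eq_pvBLoop text.toList 0]
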